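-- pv_equiv track=rewrite | github.com/Eieiz007/-Sorting-Algorithms | bubble.py | bubble_sort_animation
-- ===== SOURCE A (Python) =====
-- def bubble_sort_animation(arr):
--     animations = []
--
--     def bubble_sort(arr):
--         n = len(arr)
--         for i in range(n):
--             for j in range(0, n-i-1):
--                 if arr[j] > arr[j+1]:
--                     arr[j], arr[j+1] = arr[j+1], arr[j]
--                     animations.append(arr.copy())
--
--     bubble_sort(arr)
--     return animations
-- ===== SOURCE B (Python) =====
-- def bubble_sort_animation(arr):
--     animations = []
--
--     def bubble_sort(arr, n):
--         if n <= 1: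
--             return
--         for j in range(0, n - 1):
--             if arr[j] > arr[j + 1]:
--                 arr[j], arr[j + 1] = arr[j + 1], arr[j]
--                 animations.append(arr.copy())
--         bubble_sort(arr, n - 1)
--
--     bubble_sort(arr, len(arr))
--     return animations
-- ===== Notes on version B (the rewrite author's own statement) =====
-- stated objective: alternative
-- what changed: The outer index loop with bound n-i-1 is replaced by a recursive helper that threads the shrinking bound n through recursion (stopping at n<=1), keeping the single swap-and-snapshot pass; same frames, like A it sorts arr in place.
import Mathlib
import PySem

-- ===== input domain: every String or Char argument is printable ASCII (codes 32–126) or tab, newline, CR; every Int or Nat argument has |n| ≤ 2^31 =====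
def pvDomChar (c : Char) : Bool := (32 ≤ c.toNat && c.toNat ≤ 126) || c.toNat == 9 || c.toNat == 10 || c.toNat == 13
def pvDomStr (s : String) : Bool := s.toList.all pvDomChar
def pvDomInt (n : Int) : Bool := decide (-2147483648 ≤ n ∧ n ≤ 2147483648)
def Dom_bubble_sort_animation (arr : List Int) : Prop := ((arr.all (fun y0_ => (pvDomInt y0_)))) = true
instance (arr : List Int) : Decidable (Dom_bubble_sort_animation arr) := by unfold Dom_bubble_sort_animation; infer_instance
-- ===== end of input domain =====

-- B replaces A's outer index loop by a recursive helper threading the shrinking bound (alternative decomposition, same cost); like A, the Python B sorts arr in place — equivalence is about the returned animation list.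


-- ===== PORT A =====
-- inner loop `for j in range(0, m): if arr[j] > arr[j+1]: swap; animations.append(arr.copy())`,
-- ported as structural recursion on a prefix/rest split of the array (pref = arr[0:j], rest = arr[j:]);
-- identical in both Python versions, hence shared by both ports.
def pvPass (pref rest : List Int) (m : Nat) (anims : List (List Int)) :
    List Int × List (List Int) :=
  match m, rest with
  | 0, rest => (pref ++ rest, anims)
  | Nat.succ m, a :: b :: t =>
      if a > b then pvPass (pref ++ [b]) (a :: t) m (anims ++ [pref ++ b :: a :: t])
      else pvPass (pref ++ [a]) (b :: t) m anims
  | Nat.succ _, rest => (pref ++ rest, anims)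

def bubble_sort_animation (arr : List Int) : List (List Int) :=
  let n := arr.length
  ((List.range n).foldl
    (fun (st : List Int × List (List Int)) i => pvPass [] st.1 (n - i - 1) st.2)
    (arr, ([] : List (List Int)))).2

-- ===== PORT B =====
def pvBubbleRec (arr : List Int) (anims : List (List Int)) (n : Nat) : List (List Int) :=
  if n ≤ 1 then anims
  else
    let r := pvPass [] arr (n - 1) anims
    pvBubbleRec r.1 r.2 (n - 1)
  termination_by n
  decreasing_by omega

def bubble_sort_animation_alt (arr : List Int) : List (List Int) :=
  pvBubbleRec arr [] arr.length

-- ===== PRECONDITION & SPEC =====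
def Spec_bubble_sort_animation (arr : List Int) (out : List (List Int)) : Prop := out = bubble_sort_animation_alt arr
instance (arr : List Int) (out : List (List Int)) : Decidable (Spec_bubble_sort_animation arr out) := by unfold Spec_bubble_sort_animation; infer_instance

-- ===== CLAIM (what is proved, stated in full; the proofs are below) =====
def Claim_equal_bubble_sort_animation : Prop := ∀ (arr : List Int), Dom_bubble_sort_animation arr → Spec_bubble_sort_animation arr (bubble_sort_animation arr)

-- ===== LEMMAS AND PROOFS =====
lemma pvPass_zero (pref rest : List Int) (anims : List (List Int)) :
    pvPass pref rest 0 anims = (pref ++ rest, anims) := by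
  simp [pvPass]

lemma fold_eq_rec (k : Nat) (arr : List Int) (anims : List (List Int)) :
    ((List.range k).foldl
      (fun (st : List Int × List (List Int)) i => pvPass [] st.1 (k - i - 1) st.2)
      (arr, anims)).2 = pvBubbleRec arr anims k := by
  induction k generalizing arr anims with
  | zero => simp [pvBubbleRec]
  | succ k ih =>
    rw [List.range_succ_eq_map, List.foldl_cons, List.foldl_map]
    have hfun :
        (fun (st : List Int × List (List Int)) i => pvPass [] st.1 (k + 1 - (i + 1) - 1) st.2)
          = (fun (st : List Int × List (List Int)) i => pvPass [] st.1 (k - i - 1) st.2) := by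
      funext st i
      simp [Nat.add_sub_add_right]
    simp only [Nat.sub_zero, Nat.add_sub_cancel, hfun]
    rw [ih]
    rcases Nat.eq_zero_or_pos k with hk | hk
    · subst hk
      simp [pvPass_zero, pvBubbleRec]
    · conv_rhs => rw [pvBubbleRec]
      simp [Nat.not_le.mpr (show 1 < k + 1 by omega)]

-- ===== VERDICT (by name: the statement is the Claim_ definition above) =====
theorem bubble_sort_animation_spec : Claim_equal_bubble_sort_animation := by
  intro arr _
  unfold Spec_bubble_sort_animation bubble_sort_animation bubble_sort_animation_alt
  exact fold_eq_rec arr.length arr []
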